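-- pv_equiv track=rewrite | github.com/Hoony0321/Algorithm | 2022_01/16/kakao_recruitment_2018_3차_방금그곡.py | convertSemi
-- ===== SOURCE A (Python) =====
-- def convertSemi(scores):
--   scores = list(scores);
--   re_scores = "";
--   continue_if = False;
--   for i in range(len(scores)):
--     if continue_if: continue_if = False; continue;
--     if i+1 < len(scores) and scores[i+1] == "#":
--       re_scores += scores[i].lower();
--       continue_if = True;
--     else:
--       re_scores += scores[i];
--
--   return re_scores;
-- ===== SOURCE B (Python) =====
-- import re
--
-- def convertSemi(scores):
--   s = "".join(list(scores))
--   return re.sub(r'(.)#', lambda m: m.group(1).lower(), s, flags=re.DOTALL)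
-- ===== Notes on version B (the rewrite author's own statement) =====
-- stated objective: idiomatic
-- what changed: B replaces A's index loop with its continue_if skip-flag state machine by a single regex substitution whose pattern matches any character followed by a sharp sign, emitting the lowercased character and continuing after each leftmost match.
import Mathlib
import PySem

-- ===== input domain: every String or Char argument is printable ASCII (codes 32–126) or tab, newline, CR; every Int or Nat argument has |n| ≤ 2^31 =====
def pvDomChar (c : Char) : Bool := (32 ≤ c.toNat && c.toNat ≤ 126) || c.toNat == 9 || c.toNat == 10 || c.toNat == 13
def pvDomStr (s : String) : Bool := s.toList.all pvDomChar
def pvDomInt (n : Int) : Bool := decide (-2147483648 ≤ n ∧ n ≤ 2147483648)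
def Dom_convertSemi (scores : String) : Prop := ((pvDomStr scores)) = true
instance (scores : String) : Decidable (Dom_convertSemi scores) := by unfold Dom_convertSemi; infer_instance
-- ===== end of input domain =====

-- B replaces A's skip-flag index loop by a regex substitution re.sub(r'(.)#', lower, s): more idiomatic, same result.

-- ===== PORT A =====
-- A's loop: for i in range(len(scores)) with state (re_scores, continue_if);
-- string += char is modelled as List Char append, joined by String.ofList at the end.
def convertSemiStep (cs : List Char) (st : List Char × Bool) (i : Int) : List Char × Bool :=
  if st.2 then (st.1, false)
  else if i + 1 < (cs.length : Int) ∧ PySem.List.pyGetD cs (i + 1) ' ' = '#' then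
    (st.1 ++ [PySem.Chars.lowerChar (PySem.List.pyGetD cs i ' ')], true)
  else
    (st.1 ++ [PySem.List.pyGetD cs i ' '], false)

def convertSemi (scores : String) : String :=
  let cs := scores.toList
  let st := (PySem.List.pyRange 0 (cs.length : Int) 1).foldl (convertSemiStep cs) ([], false)
  String.ofList st.1

-- ===== PORT B =====
-- B is re.sub(r'(.)#', lambda m: m.group(1).lower(), s, flags=re.DOTALL), ported by hand as the
-- regex engine behaves on this pattern: find the LEFTMOST match of "any char then '#'"
-- (pairFind, returning the unmatched prefix, the matched char and the rest after the '#'),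
-- emit prefix ++ lowercased char, and continue substituting in the rest; no match ⇒ the text is kept.
-- Exact for this pattern: '(.)#' with DOTALL matches any two adjacent chars whose second is '#'.
def pairFind : List Char → Option (List Char × Char × List Char)
  | [] => none
  | [_] => none
  | c :: d :: rest =>
    if d = '#' then some ([], c, rest)
    else match pairFind (d :: rest) with
      | none => none
      | some (p, m, r) => some (c :: p, m, r)

lemma pairFind_length : ∀ (cs p : List Char) (m : Char) (r : List Char),
    pairFind cs = some (p, m, r) → r.length < cs.length := by
  intro cs
  induction cs with
  | nil => intro p m r h; simp [pairFind] at h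
  | cons c tl ih =>
    intro p m r h
    match tl, h with
    | [], h => simp [pairFind] at h
    | d :: rest, h =>
      by_cases hd : d = '#'
      · simp [pairFind, hd] at h
        obtain ⟨_, _, hr⟩ := h
        simp [← hr]
      · simp only [pairFind, if_neg hd] at h
        cases hpf : pairFind (d :: rest) with
        | none => rw [hpf] at h; simp at h
        | some t =>
          obtain ⟨p', m', r'⟩ := t
          rw [hpf] at h
          simp at h
          obtain ⟨_, _, hr⟩ := h
          have := ih p' m' r' hpf
          simp [← hr]
          simp at this
          omega

def pySubPairLower (cs : List Char) : List Char :=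
  match hpf : pairFind cs with
  | none => cs
  | some (p, m, r) => p ++ [PySem.Chars.lowerChar m] ++ pySubPairLower r
termination_by cs.length
decreasing_by exact pairFind_length cs p m r hpf

def convertSemi_alt (scores : String) : String :=
  String.ofList (pySubPairLower scores.toList)

-- ===== PRECONDITION & SPEC =====
def Spec_convertSemi (scores : String) (out : String) : Prop := out = convertSemi_alt scores
instance (scores : String) (out : String) : Decidable (Spec_convertSemi scores out) := by unfold Spec_convertSemi; infer_instance

-- ===== CLAIM (what is proved, stated in full; the proofs are below) =====
def Claim_equal_convertSemi : Prop := ∀ (scores : String), Dom_convertSemi scores → Spec_convertSemi scores (convertSemi scores)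

-- ===== LEMMAS AND PROOFS =====

-- Common characterization of both programs: consume a (char, '#') pair in one step, else one char.
def convertSemiGo : List Char → List Char
  | [] => []
  | [c] => [c]
  | c :: d :: rest =>
    if d = '#' then PySem.Chars.lowerChar c :: convertSemiGo rest
    else c :: convertSemiGo (d :: rest)

-- A's indexed fold over the indices of the suffix `suf` of cs = pre ++ suf, started with the
-- flag down, appends exactly convertSemiGo suf and ends with the flag down.
lemma convertSemi_loop (suf : List Char) : ∀ (pre acc : List Char),
    (PySem.List.pyRange (pre.length : Int) ((pre.length + suf.length : Nat) : Int) 1).foldl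
      (convertSemiStep (pre ++ suf)) (acc, false)
    = (acc ++ convertSemiGo suf, false) := by
  induction suf using convertSemiGo.induct with
  | case1 =>
    intro pre acc
    simp [PySem.List.pyRange_one_eq_nil, convertSemiGo]
  | case2 c =>
    intro pre acc
    rw [PySem.List.pyRange_one_cons (by simp <;> omega)]
    have h1 : ((pre.length + [c].length : Nat) : Int) = (pre.length : Int) + 1 := by
      simp
    rw [h1, PySem.List.pyRange_one_eq_nil (by omega)]
    simp [convertSemiStep, convertSemiGo, PySem.List.pyGetD_natCast,
      List.getD_eq_getElem?_getD]
  | case3 c rest ih =>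
    intro pre acc
    have hcs : pre ++ c :: '#' :: rest = (pre ++ [c, '#']) ++ rest := by simp
    have hlen : ((pre.length + (c :: '#' :: rest).length : Nat) : Int)
        = (((pre ++ [c, '#']).length + rest.length : Nat) : Int) := by simp; omega
    rw [PySem.List.pyRange_one_cons (by simp <;> omega)]
    rw [PySem.List.pyRange_one_cons (by simp <;> omega)]
    simp only [List.foldl_cons]
    have hget : PySem.List.pyGetD (pre ++ c :: '#' :: rest) ((pre.length : Int) + 1) ' ' = '#' := by
      have : ((pre.length : Int) + 1) = ((pre.length + 1 : Nat) : Int) := by push_cast; ring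
      rw [this, PySem.List.pyGetD_natCast]
      simp [List.getD_eq_getElem?_getD]
    have hgetc : PySem.List.pyGetD (pre ++ c :: '#' :: rest) (pre.length : Int) ' ' = c := by
      rw [PySem.List.pyGetD_natCast]
      simp [List.getD_eq_getElem?_getD]
    have hstep1 : convertSemiStep (pre ++ c :: '#' :: rest) (acc, false) (pre.length : Int)
        = (acc ++ [PySem.Chars.lowerChar c], true) := by
      simp [convertSemiStep, hget, hgetc]
    have hstep2 : convertSemiStep (pre ++ c :: '#' :: rest)
        (acc ++ [PySem.Chars.lowerChar c], true) ((pre.length : Int) + 1)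
        = (acc ++ [PySem.Chars.lowerChar c], false) := by
      simp [convertSemiStep]
    rw [hstep1, hstep2]
    have harg : (pre.length : Int) + 1 + 1 = (((pre ++ [c, '#']).length : Nat) : Int) := by
      simp; push_cast; ring
    rw [hlen, harg, hcs, ih (pre ++ [c, '#']) (acc ++ [PySem.Chars.lowerChar c])]
    simp [convertSemiGo]
  | case4 c d rest hd ih =>
    intro pre acc
    have hcs : pre ++ c :: d :: rest = (pre ++ [c]) ++ d :: rest := by simp
    rw [PySem.List.pyRange_one_cons (by simp <;> omega)]
    simp only [List.foldl_cons]
    have hget : PySem.List.pyGetD (pre ++ c :: d :: rest) ((pre.length : Int) + 1) ' ' = d := by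
      have : ((pre.length : Int) + 1) = ((pre.length + 1 : Nat) : Int) := by push_cast; ring
      rw [this, PySem.List.pyGetD_natCast]
      simp [List.getD_eq_getElem?_getD]
    have hgetc : PySem.List.pyGetD (pre ++ c :: d :: rest) (pre.length : Int) ' ' = c := by
      rw [PySem.List.pyGetD_natCast]
      simp [List.getD_eq_getElem?_getD]
    have hstep1 : convertSemiStep (pre ++ c :: d :: rest) (acc, false) (pre.length : Int)
        = (acc ++ [c], false) := by
      simp [convertSemiStep, hget, hgetc, hd]
    rw [hstep1]
    have hlen : ((pre.length + (c :: d :: rest).length : Nat) : Int)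
        = (((pre ++ [c]).length + (d :: rest).length : Nat) : Int) := by simp; omega
    have harg : (pre.length : Int) + 1 = (((pre ++ [c]).length : Nat) : Int) := by
      simp
    rw [hlen, harg, hcs, ih (pre ++ [c]) (acc ++ [c])]
    simp [convertSemiGo, hd]

-- Unfolding equations for the leftmost-match substitution.
lemma pySub_none (cs : List Char) (h : pairFind cs = none) : pySubPairLower cs = cs := by
  rw [pySubPairLower]
  split <;> simp_all

lemma pySub_some (cs p : List Char) (m : Char) (r : List Char)
    (h : pairFind cs = some (p, m, r)) :
    pySubPairLower cs = p ++ [PySem.Chars.lowerChar m] ++ pySubPairLower r := by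
  rw [pySubPairLower]
  split <;> simp_all

-- In the no-'#'-at-position-1 case, the leftmost-match substitution steps over one char.
lemma pySub_cons (c d : Char) (rest : List Char) (hd : d ≠ '#') :
    pySubPairLower (c :: d :: rest) = c :: pySubPairLower (d :: rest) := by
  cases hpf : pairFind (d :: rest) with
  | none =>
    have h1 : pairFind (c :: d :: rest) = none := by simp [pairFind, hd, hpf]
    rw [pySub_none _ h1, pySub_none _ hpf]
  | some t =>
    obtain ⟨p, m, r⟩ := t
    have h1 : pairFind (c :: d :: rest) = some (c :: p, m, r) := by
      simp [pairFind, hd, hpf]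
    rw [pySub_some _ _ _ _ h1, pySub_some _ _ _ _ hpf]
    simp

-- B's find-leftmost-match-and-continue substitution computes convertSemiGo.
lemma pySub_eq_go : ∀ (cs : List Char), pySubPairLower cs = convertSemiGo cs := by
  intro cs
  induction cs using convertSemiGo.induct with
  | case1 => rw [pySub_none _ (by simp [pairFind])]; simp [convertSemiGo]
  | case2 c => rw [pySub_none _ (by simp [pairFind])]; simp [convertSemiGo]
  | case3 c rest ih =>
    rw [pySub_some _ _ _ _ (by simp [pairFind] : pairFind (c :: '#' :: rest) = some ([], c, rest))]
    simp [convertSemiGo, ih]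
  | case4 c d rest hd ih =>
    rw [pySub_cons c d rest hd, ih]
    simp [convertSemiGo, hd]

-- ===== VERDICT (by name: the statement is the Claim_ definition above) =====
theorem convertSemi_spec : Claim_equal_convertSemi := by
  intro scores _
  unfold Spec_convertSemi convertSemi convertSemi_alt
  have h := convertSemi_loop scores.toList [] []
  simp only [List.length_nil, Nat.cast_zero, Nat.zero_add, List.nil_append] at h
  show String.ofList ((PySem.List.pyRange 0 (scores.toList.length : Int) 1).foldl (convertSemiStep scores.toList) ([], false)).1 = String.ofList (pySubPairLower scores.toList)
  rw [h, pySub_eq_go]
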